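-- pv_equiv track=rewrite | github.com/matthew-webber/cisco-dx-for-telehealth | ixml.py | xmlify_xpath
-- ===== SOURCE A (Python) =====
-- def xmlify_xpath(xpath):
--
--     xpath = xpath.lstrip("/").split("/")
--     group2_list = []
--     xpath[0] = xpath[0].lstrip('/')  # all of the cisco apis being with an x so get rid of that shit
--
--     group2_openclosetags = []
--     group1_opentag = []
--     group1_closetag = []
--
--     for word in xpath:
--         group1_opentag.append(f'<{word}>')
--
--     for word in xpath[::-1]:
--         group1_closetag.append(f"</{word}>")
--
--     for word in group2_list:
--         group2_openclosetags.append(f"<{word}></{word}>")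
--
--     new_xml_call = group1_opentag + group2_openclosetags + group1_closetag
--     new_xml_call = "".join(new_xml_call)
--
--     return new_xml_call
-- ===== SOURCE B (Python) =====
-- def xmlify_xpath(xpath):
--     # Build the result by nesting recursively from the outermost tag inward,
--     # instead of assembling separate open/close lists and joining them.
--     def nest(parts):
--         if not parts:
--             return ''
--         word = parts[0]
--         return f'<{word}>{nest(parts[1:])}</{word}>'
--     return nest(xpath.lstrip('/').split('/'))
-- ===== Notes on version B (the rewrite author's own statement) =====
-- stated objective: simpler
-- what changed: Replaces A's three separate tag-list loops (open tags, reversed close tags, an always-empty group2 loop) plus list concatenation and join by a single recursive nesting of the tag pair around the inner result, and drops A's redundant second strip of the first part (proved a no-op).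
import Mathlib
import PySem

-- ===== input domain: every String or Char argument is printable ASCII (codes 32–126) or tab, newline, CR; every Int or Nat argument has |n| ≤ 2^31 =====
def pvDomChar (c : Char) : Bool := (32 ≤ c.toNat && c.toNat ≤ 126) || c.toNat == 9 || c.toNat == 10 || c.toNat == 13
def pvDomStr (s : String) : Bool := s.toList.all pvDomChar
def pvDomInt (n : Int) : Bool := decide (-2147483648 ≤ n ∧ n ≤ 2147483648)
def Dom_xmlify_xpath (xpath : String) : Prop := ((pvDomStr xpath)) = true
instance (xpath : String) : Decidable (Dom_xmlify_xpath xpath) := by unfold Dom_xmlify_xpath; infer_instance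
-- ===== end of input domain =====

-- B replaces A's three tag-list loops + join by one recursive nesting of <w>…</w>; objective: simpler.

-- ===== PORT A =====
-- literal port of A; lstrip('/') is ported by hand as dropWhile (· == '/') (exact for a
-- one-character strip set), xpath[::-1] is ported as List.reverse (exact: full reversal).
def xmlify_xpath (xpath : String) : String :=
  -- xpath = xpath.lstrip("/").split("/")
  let parts := PySem.Chars.splitOn (xpath.toList.dropWhile (· == '/')) ['/']
  let group2_list : List (List Char) := []
  -- xpath[0] = xpath[0].lstrip('/')   (split never returns an empty list, so the [] arm is unreachable)
  let parts : List (List Char) :=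
    match parts with
    | [] => []
    | h :: t => (h.dropWhile (· == '/')) :: t
  let group1_opentag := parts.foldl (fun acc word => acc ++ [['<'] ++ word ++ ['>']]) []
  let group1_closetag := parts.reverse.foldl (fun acc word => acc ++ [['<', '/'] ++ word ++ ['>']]) []
  let group2_openclosetags := group2_list.foldl
    (fun acc word => acc ++ [['<'] ++ word ++ ['>', '<', '/'] ++ word ++ ['>']]) []
  String.mk (PySem.Chars.join [] (group1_opentag ++ group2_openclosetags ++ group1_closetag))

-- ===== PORT B =====
-- B's helper nest(parts): recursive nesting from the outermost tag inward
def nestTags : List (List Char) → List Char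
  | [] => []
  | w :: rest => ['<'] ++ w ++ ['>'] ++ nestTags rest ++ ['<', '/'] ++ w ++ ['>']

def xmlify_xpath_alt (xpath : String) : String :=
  String.mk (nestTags (PySem.Chars.splitOn (xpath.toList.dropWhile (· == '/')) ['/']))

-- ===== PRECONDITION & SPEC =====
def Spec_xmlify_xpath (xpath : String) (out : String) : Prop := out = xmlify_xpath_alt xpath
instance (xpath : String) (out : String) : Decidable (Spec_xmlify_xpath xpath out) := by unfold Spec_xmlify_xpath; infer_instance

-- ===== CLAIM (what is proved, stated in full; the proofs are below) =====
def Claim_equal_xmlify_xpath : Prop := ∀ (xpath : String), Dom_xmlify_xpath xpath → Spec_xmlify_xpath xpath (xmlify_xpath xpath)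

-- ===== LEMMAS AND PROOFS =====

-- splitOn.go pulls its accumulator out front
theorem go_acc (sep : List Char) (fuel : Nat) (l cur : List Char) (acc : List (List Char)) :
    PySem.Chars.splitOn.go sep fuel l cur acc =
      acc.reverse ++ PySem.Chars.splitOn.go sep fuel l cur [] := by
  induction fuel generalizing l cur acc with
  | zero => simp [PySem.Chars.splitOn.go]
  | succ f ih =>
    cases l with
    | nil => simp [PySem.Chars.splitOn.go]
    | cons c rest =>
      rw [PySem.Chars.splitOn.go, PySem.Chars.splitOn.go]
      split_ifs with h
      · rw [ih _ _ (cur.reverse :: acc), ih _ _ [cur.reverse]]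
        simp
      · exact ih _ _ _

-- with enough fuel, the first piece produced by splitOn.go on separator '/' is
-- cur.reverse followed by the slash-free prefix of l
theorem go_head (fuel : Nat) (l cur : List Char) (h : l.length < fuel) :
    ∃ rest, PySem.Chars.splitOn.go ['/'] fuel l cur [] =
      (cur.reverse ++ l.takeWhile (fun c => !(c == '/'))) :: rest := by
  induction l generalizing fuel cur with
  | nil =>
    cases fuel with
    | zero => omega
    | succ f => exact ⟨[], by simp [PySem.Chars.splitOn.go]⟩
  | cons c t ih =>
    cases fuel with
    | zero => omega
    | succ f =>
      rw [PySem.Chars.splitOn.go]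
      by_cases hc : c = '/'
      · subst hc
        simp only [List.isPrefixOf, List.takeWhile]
        rw [if_pos (by simp)]
        refine ⟨PySem.Chars.splitOn.go ['/'] f t [] [], ?_⟩
        rw [go_acc]
        simp
      · rw [if_neg (by simp [List.isPrefixOf, Ne.symm hc])]
        obtain ⟨rest, hr⟩ := ih f (c :: cur) (by simpa using Nat.lt_of_succ_lt_succ h)
        refine ⟨rest, ?_⟩
        rw [hr, List.takeWhile_cons_of_pos (by simp [hc])]
        simp

-- the first piece of a split on '/' is the slash-free prefix of the input
theorem splitOn_head (l : List Char) :
    ∃ rest, PySem.Chars.splitOn l ['/'] = (l.takeWhile (fun c => !(c == '/'))) :: rest := by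
  unfold PySem.Chars.splitOn
  simpa using go_head (l.length + 1) l [] (by omega)

-- stripping leading '/' from a slash-free prefix does nothing
theorem dropWhile_takeWhile (l : List Char) :
    (l.takeWhile (fun c => !(c == '/'))).dropWhile (· == '/') =
      l.takeWhile (fun c => !(c == '/')) := by
  cases l with
  | nil => simp
  | cons c t =>
    by_cases hc : c = '/'
    · simp [List.takeWhile, hc]
    · rw [List.takeWhile_cons_of_pos (by simp [hc]), List.dropWhile_cons_of_neg (by simp [hc])]

-- appending loops are maps
theorem foldl_push {α β : Type} (f : α → β) (l : List α) (a : List β) :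
    l.foldl (fun acc w => acc ++ [f w]) a = a ++ l.map f := by
  induction l generalizing a with
  | nil => simp
  | cons h t ih => simp [List.foldl, ih]

-- "".join is flatten
theorem join_nil_flatten (xs : List (List Char)) :
    PySem.Chars.join [] xs = xs.flatten := by
  induction xs with
  | nil => rfl
  | cons h t ih =>
    cases t with
    | nil => simp [PySem.Chars.join, List.intercalate]
    | cons h' t' =>
      rw [PySem.Chars.join_cons_cons, ih]
      simp

-- the open tags, then the close tags in reverse, concatenated, equal the recursive nesting
theorem flat_eq_nest (parts : List (List Char)) :
    (parts.map (fun w => ['<'] ++ w ++ ['>']) ++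
      (parts.reverse.map (fun w => ['<', '/'] ++ w ++ ['>']))).flatten = nestTags parts := by
  induction parts with
  | nil => rfl
  | cons h t ih =>
    simp only [List.map_cons, List.reverse_cons, List.map_append, nestTags]
    rw [← ih]
    simp

-- ===== VERDICT (by name: the statement is the Claim_ definition above) =====
theorem xmlify_xpath_spec : Claim_equal_xmlify_xpath := by
  intro xpath _
  unfold Spec_xmlify_xpath xmlify_xpath xmlify_xpath_alt
  obtain ⟨rest, hs⟩ := splitOn_head (xpath.toList.dropWhile (· == '/'))
  rw [hs]
  simp only [dropWhile_takeWhile, foldl_push, List.foldl_nil, List.nil_append,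
    join_nil_flatten, List.append_nil]
  rw [flat_eq_nest]
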